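-- pv_equiv track=rewrite | github.com/hasnainsubhani/DataScience | Assignment/Programming_Assignment/Programming_Assignment_24.py | Amplify
-- ===== SOURCE A (Python) =====
-- def Amplify(numb:'int')->list:
--   '''
--   Create a function that takes an integer and returns a list from 1 to the given number, where:
--   1. If the number can be divided evenly by 4, amplify it by 10 (i.e. return 10 times the
--   number).
--   2. If the number cannot be divided evenly by 4, simply return the number.
--   '''
--   result = list()
--   for item in range(1,numb+1):
--     if item%4==0:
--       result.append(item*10)
--     else:
--       result.append(item)
--
--   return result
-- ===== SOURCE B (Python) =====
-- def Amplify(numb: 'int') -> list: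
--     # Build complete blocks of four at once, multiplying the block's last
--     # element (a multiple of 4) by 10, then append the leftover tail.
--     result = []
--     k = 4
--     while k <= numb:
--         result.extend((k - 3, k - 2, k - 1, k * 10))
--         k += 4
--     result.extend(range(k - 3, numb + 1))
--     return result
-- ===== Notes on version B (the rewrite author's own statement) =====
-- stated objective: alternative
-- what changed: B emits whole blocks of four numbers per loop iteration (three unchanged plus the amplified multiple of 4) and appends the leftover tail with range, instead of A's per-element loop that tests divisibility on every number.
import Mathlib
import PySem

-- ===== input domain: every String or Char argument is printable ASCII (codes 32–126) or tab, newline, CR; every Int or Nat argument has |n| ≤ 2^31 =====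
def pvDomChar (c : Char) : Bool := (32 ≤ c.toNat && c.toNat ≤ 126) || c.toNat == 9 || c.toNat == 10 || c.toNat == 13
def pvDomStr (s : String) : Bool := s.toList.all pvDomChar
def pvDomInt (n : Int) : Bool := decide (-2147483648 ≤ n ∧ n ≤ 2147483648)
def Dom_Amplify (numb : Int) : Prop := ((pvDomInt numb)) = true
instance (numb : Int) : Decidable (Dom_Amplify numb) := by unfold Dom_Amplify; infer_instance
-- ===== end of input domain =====

-- B changes the traversal: it emits whole blocks of four (three plain numbers plus the
-- amplified multiple of 4) per iteration instead of testing divisibility on each element.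

-- ===== PORT A =====
def Amplify (numb : Int) : List Int :=
  (PySem.List.pyRange 1 (numb + 1) 1).foldl
    (fun result item =>
      if PySem.Int.mod item 4 == 0 then result ++ [item * 10] else result ++ [item])
    []

-- ===== PORT B =====
def ampLoop (numb k : Int) (result : List Int) : List Int :=
  if _h : k ≤ numb then
    ampLoop numb (k + 4) (result ++ [k - 3, k - 2, k - 1, k * 10])
  else
    result ++ PySem.List.pyRange (k - 3) (numb + 1) 1
termination_by (numb + 1 - k).toNat
decreasing_by omega

def Amplify_alt (numb : Int) : List Int := ampLoop numb 4 []

-- ===== PRECONDITION & SPEC =====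
def Spec_Amplify (numb : Int) (out : List Int) : Prop := out = Amplify_alt numb
instance (numb : Int) (out : List Int) : Decidable (Spec_Amplify numb out) := by unfold Spec_Amplify; infer_instance

-- ===== CLAIM (what is proved, stated in full; the proofs are below) =====
def Claim_equal_Amplify : Prop := ∀ (numb : Int), Dom_Amplify numb → Spec_Amplify numb (Amplify numb)

-- ===== LEMMAS AND PROOFS =====

-- the per-element amplification A applies
def ampF (item : Int) : Int := if PySem.Int.mod item 4 == 0 then item * 10 else item

theorem mod4_eq (a : Int) : PySem.Int.mod a 4 = a % 4 :=
  PySem.Int.mod_eq_emod_of_pos (by omega)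

theorem Amplify_eq_map (numb : Int) :
    Amplify numb = (PySem.List.pyRange 1 (numb + 1) 1).map ampF := by
  unfold Amplify
  have h : ∀ (acc : List Int) (item : Int),
      (if PySem.Int.mod item 4 == 0 then acc ++ [item * 10] else acc ++ [item])
        = acc ++ [ampF item] := by
    intro acc item
    unfold ampF
    split <;> rfl
  simp only [h]
  exact PySem.List.foldl_append_singleton_eq_map _ _ _

theorem ampF_of_not_dvd (x : Int) (h : x % 4 ≠ 0) : ampF x = x := by
  unfold ampF
  rw [mod4_eq]
  simp [h]

theorem tail_map (numb k : Int) (hk : k % 4 = 0) (h : numb < k) :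
    (PySem.List.pyRange (k - 3) (numb + 1) 1).map ampF
      = PySem.List.pyRange (k - 3) (numb + 1) 1 := by
  conv_rhs => rw [← List.map_id (PySem.List.pyRange (k - 3) (numb + 1) 1)]
  refine List.map_congr_left (fun x hx => ?_)
  rw [PySem.List.mem_pyRange_one] at hx
  exact ampF_of_not_dvd x (by omega)

theorem ampLoop_eq (numb : Int) (n : Nat) : ∀ (k : Int) (acc : List Int),
    (numb + 1 - k).toNat ≤ n → k % 4 = 0 →
    ampLoop numb k acc = acc ++ (PySem.List.pyRange (k - 3) (numb + 1) 1).map ampF := by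
  induction n with
  | zero =>
    intro k acc hn hk
    rw [ampLoop, dif_neg (by omega : ¬ k ≤ numb), tail_map numb k hk (by omega)]
  | succ m ih =>
    intro k acc hn hk
    rw [ampLoop]
    split
    · next hle =>
      have hm : (numb + 1 - (k + 4)).toNat ≤ m := by omega
      rw [ih (k + 4) _ hm (by omega)]
      rw [PySem.List.pyRange_one_append (k - 3) (k + 1) (numb + 1) (by omega) (by omega)]
      rw [List.map_append, ← List.append_assoc]
      congr 1
      have hr : PySem.List.pyRange (k - 3) (k + 1) 1 = [k - 3, k - 2, k - 1, k] := by
        rw [PySem.List.pyRange_one_cons (by omega), PySem.List.pyRange_one_cons (by omega),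
            PySem.List.pyRange_one_cons (by omega), PySem.List.pyRange_one_cons (by omega),
            PySem.List.pyRange_one_eq_nil (by omega)]
        simp only [List.cons.injEq, true_and, and_true]
        omega
      rw [hr]
      simp only [List.map]
      rw [ampF_of_not_dvd (k - 3) (by omega), ampF_of_not_dvd (k - 2) (by omega),
          ampF_of_not_dvd (k - 1) (by omega)]
      have hk4 : ampF k = k * 10 := by unfold ampF; rw [mod4_eq]; simp [hk]
      rw [hk4]
      congr 2
      omega
    · next hgt =>
      rw [tail_map numb k hk (by omega)]

-- ===== VERDICT (by name: the statement is the Claim_ definition above) =====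
theorem Amplify_spec : Claim_equal_Amplify := by
  intro numb _
  unfold Spec_Amplify Amplify_alt
  rw [Amplify_eq_map, ampLoop_eq numb (numb + 1 - 4).toNat 4 [] (le_refl _) (by decide)]
  norm_num
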